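-- pv_equiv track=rewrite | github.com/tlsrhkr7/Handwriting_Calculator | Handwriting_Calculator.py | convert_to_calculate_functions
-- ===== SOURCE A (Python) =====
-- def convert_to_calculate_functions(latex_expression):
--     # Mathpix Api 식 LaTeX를 계산용 LaTex로 변환을 위한 함수
--     trig_functions = {
--         '\operatorname { sin }': '\sin',
--         '\operatorname { cos }': '\cos',
--         '\operatorname { tan }': '\tan',
--         '\operatorname { csc }': '\csc',
--         '\operatorname { sec }': '\sec',
--         '\operatorname { cot }': '\cot',
--         '\operatorname { ln }': '\ln',
--         '\operatorname { log }': '\log',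
--         '\operatorname { lim }': '\lim',
--     }
--
--     for func in trig_functions:
--         if func in latex_expression:
--             latex_expression = latex_expression.replace(func, trig_functions[func])
--     return latex_expression
-- ===== SOURCE B (Python) =====
-- def convert_to_calculate_functions(latex_expression):
--     # Single left-to-right scan: at each position try the nine
--     # '\operatorname { NAME }' patterns and emit the '\NAME' shorthand.
--     names = ('sin', 'cos', 'tan', 'csc', 'sec', 'cot', 'ln', 'log', 'lim')
--     table = [('\\operatorname { ' + name + ' }', '\\' + name) for name in names]
--     out = []
--     s = latex_expression
--     i = 0
--     n = len(s)
--     while i < n: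
--         for pat, rep in table:
--             if s.startswith(pat, i):
--                 out.append(rep)
--                 i += len(pat)
--                 break
--         else:
--             out.append(s[i])
--             i += 1
--     return ''.join(out)
-- ===== Notes on version B (the rewrite author's own statement) =====
-- stated objective: alternative
-- what changed: A makes nine sequential full-string scan-and-replace passes (one str.replace per operator name); B makes a single left-to-right scan that at each position tries the nine '\operatorname { NAME }' patterns and emits the '\NAME' shorthand directly.
-- intended difference: On inputs containing the substring '\operatorname { tan }' A replaces it with TAB+'an' (the source literal '\tan' contains a tab escape) while B emits the LaTeX command backslash+'tan', which is the intended conversion. — e.g. on convert_to_calculate_functions("\\operatorname { tan } x"): A returns "\tan x", B returns "\\tan x"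
import Mathlib
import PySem

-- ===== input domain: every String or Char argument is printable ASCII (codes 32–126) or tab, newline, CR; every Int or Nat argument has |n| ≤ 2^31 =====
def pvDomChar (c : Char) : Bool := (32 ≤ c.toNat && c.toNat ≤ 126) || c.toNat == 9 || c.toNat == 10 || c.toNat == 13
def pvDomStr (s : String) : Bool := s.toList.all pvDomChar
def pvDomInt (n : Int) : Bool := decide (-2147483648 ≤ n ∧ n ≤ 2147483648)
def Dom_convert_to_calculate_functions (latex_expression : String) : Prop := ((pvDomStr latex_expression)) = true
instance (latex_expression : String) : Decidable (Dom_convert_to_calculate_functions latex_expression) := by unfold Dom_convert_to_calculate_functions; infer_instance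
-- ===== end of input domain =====

set_option maxRecDepth 10000

-- B replaces A's nine sequential str.replace passes by one left-to-right scan that tries
-- the nine '\operatorname { NAME }' patterns at each position (objective: alternative
-- algorithm).  A's '\tan' replacement literal is TAB+'an' (a tab-escape slip in the
-- Python source); B emits backslash+'tan' there — see D_ below.


-- ===== PORT A =====
-- the dict literal of A; note: the Python value literal '\tan' contains a tab escape,
-- so it is "\tan" (TAB + "an") below, while the keys' '\o' and the other values' '\s' etc.
-- are literal backslashes
def pvTrigFns : PySem.Dict String String := PySem.Dict.mk
  [ ("\\operatorname { sin }", "\\sin")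
  , ("\\operatorname { cos }", "\\cos")
  , ("\\operatorname { tan }", "\tan")
  , ("\\operatorname { csc }", "\\csc")
  , ("\\operatorname { sec }", "\\sec")
  , ("\\operatorname { cot }", "\\cot")
  , ("\\operatorname { ln }", "\\ln")
  , ("\\operatorname { log }", "\\log")
  , ("\\operatorname { lim }", "\\lim") ]

def convert_to_calculate_functions (latex_expression : String) : String :=
  -- for func in trig_functions: if func in s: s = s.replace(func, trig_functions[func])
  pvTrigFns.keys.foldl
    (fun s func =>
      if PySem.Str.isIn func s then PySem.Str.replace s func (pvTrigFns.getD func "") else s)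
    latex_expression

-- ===== PORT B =====
def pvNamesB : List String := ["sin", "cos", "tan", "csc", "sec", "cot", "ln", "log", "lim"]

-- table = [('\operatorname { ' + name + ' }', '\' + name) for name in names]
def pvTableB : List (List Char × List Char) :=
  pvNamesB.map (fun nm => (("\\operatorname { " ++ nm ++ " }").toList, ("\\" ++ nm).toList))

-- the while loop (fuel = the remaining length, so one structural step per iteration):
-- at each position the first matching (pat, rep) of the table is emitted
-- (for … break / else), otherwise the current character is copied
def pvScanGo (T : List (List Char × List Char)) : Nat → List Char → List Char
  | _, [] => []
  | 0, s => s
  | fuel + 1, c :: t =>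
    match T.find? (fun pr => pr.1.isPrefixOf (c :: t)) with
    | some pr => pr.2 ++ pvScanGo T fuel (t.drop (pr.1.length - 1))
    | none => c :: pvScanGo T fuel t

def pvScan (T : List (List Char × List Char)) (s : List Char) : List Char :=
  pvScanGo T s.length s

def convert_to_calculate_functions_alt (latex_expression : String) : String :=
  String.ofList (pvScan pvTableB latex_expression.toList)

-- ===== PRECONDITION & SPEC =====
-- On inputs containing the substring '\operatorname { tan }' A replaces it with TAB+'an'
-- (the Python source literal '\tan' contains a tab escape) while B emits the LaTeX command
-- backslash+'tan', which is the intended conversion.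
def D_convert_to_calculate_functions (latex_expression : String) : Prop :=
  PySem.Str.isIn "\\operatorname { tan }" latex_expression = true
instance (latex_expression : String) : Decidable (D_convert_to_calculate_functions latex_expression) := by
  unfold D_convert_to_calculate_functions; infer_instance

def Spec_convert_to_calculate_functions (latex_expression : String) (out : String) : Prop :=
  ¬ D_convert_to_calculate_functions latex_expression → out = convert_to_calculate_functions_alt latex_expression
instance (latex_expression : String) (out : String) : Decidable (Spec_convert_to_calculate_functions latex_expression out) := by
  unfold Spec_convert_to_calculate_functions; infer_instance

def pvDiffWitness_convert_to_calculate_functions : String := "\\operatorname { tan } x"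
def pvDiffWitnessOut_convert_to_calculate_functions : String × String := ("\tan x", "\\tan x")

-- ===== CLAIM (what is proved, stated in full; the proofs are below) =====
def Claim_unchanged_convert_to_calculate_functions : Prop := ∀ (latex_expression : String), Dom_convert_to_calculate_functions latex_expression → Spec_convert_to_calculate_functions latex_expression (convert_to_calculate_functions latex_expression)
def Claim_changed_convert_to_calculate_functions : Prop := Dom_convert_to_calculate_functions (pvDiffWitness_convert_to_calculate_functions) ∧ D_convert_to_calculate_functions (pvDiffWitness_convert_to_calculate_functions) ∧ convert_to_calculate_functions (pvDiffWitness_convert_to_calculate_functions) = pvDiffWitnessOut_convert_to_calculate_functions.1 ∧ convert_to_calculate_functions_alt (pvDiffWitness_convert_to_calculate_functions) = pvDiffWitnessOut_convert_to_calculate_functions.2 ∧ pvDiffWitnessOut_convert_to_calculate_functions.1 ≠ pvDiffWitnessOut_convert_to_calculate_functions.2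
def Claim_exact_convert_to_calculate_functions : Prop := ∀ (latex_expression : String), Dom_convert_to_calculate_functions latex_expression → D_convert_to_calculate_functions latex_expression → convert_to_calculate_functions latex_expression ≠ convert_to_calculate_functions_alt latex_expression

-- ===== LEMMAS AND PROOFS =====

-- marker characters: '\' begins every pattern and every replacement except A's tan
-- replacement, which begins with TAB; no pattern or replacement contains either past index 0
def pvMark (c : Char) : Bool := c == '\\' || c == '\t'

-- a token: nonempty, marker first character, marker-free tail
def pvOkTokB : List Char → Bool
  | [] => false
  | c :: t => pvMark c && t.all (fun x => !pvMark x)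

abbrev pvOkTok (l : List Char) : Prop := pvOkTokB l = true

-- a nonempty token has a marker head
theorem pvTok_head (q : List Char) (hq : pvOkTok q) :
    ∃ q0 qt, q = q0 :: qt ∧ pvMark q0 = true ∧ ∀ x ∈ qt, pvMark x = false := by
  cases q with
  | nil => simp [pvOkTok, pvOkTokB] at hq
  | cons a b =>
    simp only [pvOkTok, pvOkTokB, Bool.and_eq_true, List.all_eq_true] at hq
    exact ⟨a, b, rfl, hq.1, fun x hx => by simpa using hq.2 x hx⟩

theorem pvTok_ne_nil (q : List Char) (hq : pvOkTok q) : q ≠ [] := by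
  intro h; subst h; simp [pvOkTok, pvOkTokB] at hq


-- Python str.replace, structurally (old ≠ [] in every use below)
def pvRepl (p r : List Char) : List Char → List Char
  | [] => []
  | c :: t =>
    if p.isPrefixOf (c :: t) then r ++ pvRepl p r (t.drop (p.length - 1))
    else c :: pvRepl p r t
termination_by s => s.length
decreasing_by
  · simp only [List.length_cons]
    have : (t.drop (p.length - 1)).length ≤ t.length := by
      rw [List.length_drop]; omega
    omega
  · simp

-- A's loop: sequential conditional replaces over the table
def pvChain (T : List (List Char × List Char)) (s : List Char) : List Char :=
  T.foldl (fun acc pr => pvRepl pr.1 pr.2 acc) s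

-- A's table, at char-list level
def pvTableA : List (List Char × List Char) :=
  (pvTrigFns.keys).map (fun k => (k.toList, (pvTrigFns.getD k "").toList))

-- pattern of the tan entry
def pvTanP : List Char := "\\operatorname { tan }".toList

-- ---- pvScanGo bookkeeping ----

theorem pvScanGo_nil (T : List (List Char × List Char)) (fuel : Nat) :
    pvScanGo T fuel [] = [] := by
  cases fuel <;> rw [pvScanGo]

theorem pvScanGo_irrel (T : List (List Char × List Char)) :
    ∀ (f1 f2 : Nat) (s : List Char), s.length ≤ f1 → s.length ≤ f2 →
      pvScanGo T f1 s = pvScanGo T f2 s := by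
  intro f1
  induction f1 with
  | zero =>
    intro f2 s h1 _
    have : s = [] := List.eq_nil_of_length_eq_zero (Nat.le_zero.mp h1)
    subst this
    rw [pvScanGo_nil, pvScanGo_nil]
  | succ f ih =>
    intro f2 s h1 h2
    cases s with
    | nil => rw [pvScanGo_nil, pvScanGo_nil]
    | cons c t =>
      cases f2 with
      | zero => simp at h2
      | succ f2' =>
        rw [pvScanGo, pvScanGo]
        simp only [List.length_cons] at h1 h2
        cases hf : T.find? (fun pr => pr.1.isPrefixOf (c :: t)) with
        | some pr =>
          simp only [hf]
          congr 1
          exact ih f2' _ (by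
            have : (t.drop (pr.1.length - 1)).length ≤ t.length := by
              rw [List.length_drop]; omega
            omega) (by
            have : (t.drop (pr.1.length - 1)).length ≤ t.length := by
              rw [List.length_drop]; omega
            omega)
        | none =>
          simp only [hf]
          congr 1
          exact ih f2' t (by omega) (by omega)

theorem pvScan_match (T : List (List Char × List Char)) (c : Char) (t : List Char)
    (pr : List Char × List Char)
    (hf : T.find? (fun pr => pr.1.isPrefixOf (c :: t)) = some pr) :
    pvScan T (c :: t) = pr.2 ++ pvScan T (t.drop (pr.1.length - 1)) := by
  show pvScanGo T (c :: t).length (c :: t) = _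
  simp only [List.length_cons]
  rw [pvScanGo]
  simp only [hf]
  congr 1
  exact pvScanGo_irrel T t.length _ _ (by
    have : (t.drop (pr.1.length - 1)).length ≤ t.length := by
      rw [List.length_drop]; omega
    omega) (le_refl _)

theorem pvScan_nomatch (T : List (List Char × List Char)) (c : Char) (t : List Char)
    (hf : T.find? (fun pr => pr.1.isPrefixOf (c :: t)) = none) :
    pvScan T (c :: t) = c :: pvScan T t := by
  show pvScanGo T (c :: t).length (c :: t) = _
  simp only [List.length_cons]
  rw [pvScanGo]
  simp only [hf]
  rfl

-- ---- basic facts about pvRepl ----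

theorem pvRepl_nil (p r : List Char) : pvRepl p r [] = [] := by
  rw [pvRepl]

-- PySem.Chars.replace.go agrees with pvRepl when fueled enough
theorem pvGo_spec (old new : List Char) (hold : old ≠ []) :
    ∀ (fuel : Nat) (l acc : List Char), l.length ≤ fuel →
      PySem.Chars.replace.go old new fuel l acc = acc.reverse ++ pvRepl old new l := by
  intro fuel
  induction fuel with
  | zero =>
    intro l acc hl
    have : l = [] := List.eq_nil_of_length_eq_zero (Nat.le_zero.mp hl)
    subst this
    simp [PySem.Chars.replace.go, pvRepl_nil]
  | succ n ih =>
    intro l acc hl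
    cases l with
    | nil => simp [PySem.Chars.replace.go, pvRepl_nil]
    | cons c t =>
      rw [PySem.Chars.replace.go]
      by_cases h : old.isPrefixOf (c :: t) = true
      · rw [if_pos h]
        have hlen : old.length ≥ 1 := by
          cases old with
          | nil => exact absurd rfl hold
          | cons _ _ => simp
        have hdrop : List.drop old.length (c :: t) = t.drop (old.length - 1) := by
          cases old with
          | nil => exact absurd rfl hold
          | cons o os => simp
        rw [hdrop, ih _ _ (by
          have : (t.drop (old.length - 1)).length ≤ t.length := by
            rw [List.length_drop]; omega
          simp only [List.length_cons] at hl
          omega)]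
        rw [pvRepl, if_pos h]
        simp
      · rw [if_neg h]
        rw [ih _ _ (by simp only [List.length_cons] at hl; omega)]
        rw [pvRepl, if_neg h]
        simp

-- replace with no occurrence is the identity
theorem pvRepl_no_occ (p r : List Char) :
    ∀ s, ¬ p <:+: s → pvRepl p r s = s := by
  intro s
  induction s with
  | nil => intro _; exact pvRepl_nil p r
  | cons c t ih =>
    intro h
    rw [pvRepl]
    rw [if_neg (by
      intro hpre
      exact h ((List.isPrefixOf_iff_prefix.mp hpre).isInfix))]
    rw [ih (fun hi => h (List.infix_cons hi))]

-- pass a marker-free block through pvRepl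
theorem pvRepl_pass_free (p r : List Char) (c0 : Char) (pt : List Char)
    (hp : p = c0 :: pt) (hc0 : pvMark c0 = true) :
    ∀ (w x : List Char), (∀ y ∈ w, pvMark y = false) →
      pvRepl p r (w ++ x) = w ++ pvRepl p r x := by
  intro w
  induction w with
  | nil => intro x _; simp
  | cons a w' ih =>
    intro x hw
    have hnp : ¬ p.isPrefixOf (a :: (w' ++ x)) = true := by
      intro hpre
      have := List.isPrefixOf_iff_prefix.mp hpre
      rw [hp] at this
      have := (List.cons_prefix_cons.mp this).1
      subst this
      have := hw c0 (by simp)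
      rw [hc0] at this; exact absurd this (by simp)
    have : pvRepl p r ((a :: w') ++ x) = a :: pvRepl p r (w' ++ x) := by
      rw [List.cons_append, pvRepl, if_neg hnp]
    rw [this, ih x (fun y hy => hw y (by simp [hy]))]
    simp

-- pass a whole token (marker head, marker-free tail) through pvRepl
theorem pvRepl_pass_tok (p r q : List Char) (c0 : Char) (pt : List Char)
    (hp : p = c0 :: pt) (hc0 : pvMark c0 = true) (hq : pvOkTok q)
    (hnp : ∀ x, ¬ p <+: q ++ x) :
    ∀ y, pvRepl p r (q ++ y) = q ++ pvRepl p r y := by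
  intro y
  obtain ⟨q0, qt, hqe, -, hqt⟩ := pvTok_head q hq
  subst hqe
  · have hstep : pvRepl p r ((q0 :: qt) ++ y) = q0 :: pvRepl p r (qt ++ y) := by
      rw [List.cons_append, pvRepl, if_neg (by
        intro hpre
        refine hnp y ?_
        rw [List.cons_append]
        exact List.isPrefixOf_iff_prefix.mp hpre)]
    rw [hstep, pvRepl_pass_free p r c0 pt hp hc0 qt y hqt]
    simp

-- replacing at a match
theorem pvRepl_self (p r : List Char) (hp : p ≠ []) (y : List Char) :
    pvRepl p r (p ++ y) = r ++ pvRepl p r y := by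
  cases p with
  | nil => exact absurd rfl hp
  | cons p0 pt =>
    rw [List.cons_append, pvRepl, if_pos (by
      rw [List.isPrefixOf_iff_prefix, ← List.cons_append]; exact List.prefix_append _ _)]
    congr 1
    have : (pt ++ y).drop ((p0 :: pt).length - 1) = y := by
      simp only [List.length_cons, Nat.add_sub_cancel]
      exact List.drop_left
    rw [this]

-- non-comparable lists never match across a concatenation boundary
theorem pvNoPrefixAppend {p q : List Char} (h1 : ¬ p <+: q) (h2 : ¬ q <+: p) :
    ∀ x, ¬ p <+: q ++ x := by
  intro x h
  rcases List.prefix_or_prefix_of_prefix h (List.prefix_append q x) with h' | h'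
  · exact h1 h'
  · exact h2 h'

-- a marker-free prefix window of a replace result is untouched input
theorem pvRepl_take_pullback (p r : List Char) (p0 : Char) (pt : List Char)
    (hp : p = p0 :: pt) (r0 : Char) (rt : List Char) (hr : r = r0 :: rt)
    (hr0 : pvMark r0 = true) :
    ∀ (t : List Char) (m : Nat), (∀ x ∈ (pvRepl p r t).take m, pvMark x = false) →
      (pvRepl p r t).take m = t.take m := by
  intro t
  induction t using pvRepl.induct p with
  | case1 => intro m _; simp [pvRepl_nil]
  | case2 c t hpre ih =>
    intro m hm
    rw [pvRepl, if_pos hpre] at hm ⊢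
    cases m with
    | zero => simp
    | succ m' =>
      exfalso
      have : r0 ∈ ((r ++ pvRepl p r (t.drop (p.length - 1))).take (m' + 1)) := by
        rw [hr]; simp
      have := hm r0 this
      rw [hr0] at this; exact absurd this (by simp)
  | case3 c t hpre ih =>
    intro m hm
    rw [pvRepl, if_neg hpre] at hm ⊢
    cases m with
    | zero => simp
    | succ m' =>
      simp only [List.take_succ_cons]
      rw [ih m' (fun x hx => hm x (by simp [hx]))]

-- table hypotheses for the generic theorems
def pvGood (T : List (List Char × List Char)) : Prop :=
  (∀ pr ∈ T, pvOkTok pr.1 ∧ pvOkTok pr.2) ∧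
  (∀ pr ∈ T, ∀ pr' ∈ T, pr.1 ≠ pr'.1 → ¬ pr.1 <+: pr'.1) ∧
  (∀ pr ∈ T, ∀ pr' ∈ T, ¬ pr.1 <+: pr'.2 ∧ ¬ pr'.2 <+: pr.1) ∧
  (T.map Prod.fst).Nodup

theorem pvChain_nil (T : List (List Char × List Char)) : pvChain T [] = [] := by
  induction T with
  | nil => rfl
  | cons pr T' ih =>
    show pvChain T' (pvRepl pr.1 pr.2 []) = []
    rw [pvRepl_nil]; exact ih

-- pass a token through the whole chain
theorem pvChain_pass_tok (U : List (List Char × List Char))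
    (hU : ∀ pr ∈ U, pvOkTok pr.1) (q : List Char) (hq : pvOkTok q)
    (hnp : ∀ pr ∈ U, ∀ x, ¬ pr.1 <+: q ++ x) :
    ∀ y, pvChain U (q ++ y) = q ++ pvChain U y := by
  induction U with
  | nil => intro y; rfl
  | cons pr U' ih =>
    intro y
    obtain ⟨p0, pt, hp, hc0, -⟩ := pvTok_head pr.1 (hU pr (by simp))
    show pvChain U' (pvRepl pr.1 pr.2 (q ++ y)) = q ++ pvChain U' (pvRepl pr.1 pr.2 y)
    rw [pvRepl_pass_tok pr.1 pr.2 q p0 pt hp hc0 hq (hnp pr (by simp))]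
    exact ih (fun pr' h => hU pr' (by simp [h])) (fun pr' h => hnp pr' (by simp [h])) _

-- a no-match head character passes through the chain
theorem pvChain_cons_char (U : List (List Char × List Char))
    (hU : ∀ pr ∈ U, pvOkTok pr.1 ∧ pvOkTok pr.2) :
    ∀ (c : Char) (t : List Char), (∀ pr ∈ U, ¬ pr.1 <+: c :: t) →
      pvChain U (c :: t) = c :: pvChain U t := by
  induction U with
  | nil => intro c t _; rfl
  | cons pr U' ih =>
    intro c t hm
    show pvChain U' (pvRepl pr.1 pr.2 (c :: t)) = c :: pvChain U' (pvRepl pr.1 pr.2 t)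
    have hstep : pvRepl pr.1 pr.2 (c :: t) = c :: pvRepl pr.1 pr.2 t := by
      rw [pvRepl, if_neg (by
        intro hpre
        exact hm pr (by simp) (List.isPrefixOf_iff_prefix.mp hpre))]
    rw [hstep]
    apply ih (fun pr' h => hU pr' (by simp [h]))
    -- each no-match is preserved on the rewritten tail
    intro pr' hpr' hpre
    obtain ⟨p0, pt, hp, hpc0, -⟩ := pvTok_head pr.1 (hU pr (by simp)).1
    obtain ⟨r0, rt, hrr, hr0, -⟩ := pvTok_head pr.2 (hU pr (by simp)).2
    obtain ⟨q0, qt, hq, -, hqt⟩ := pvTok_head pr'.1 (hU pr' (by simp [hpr'])).1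
    rw [hq] at hpre
    have hq0 : q0 = c := (List.cons_prefix_cons.mp hpre).1
    have hqt_pre : qt <+: pvRepl pr.1 pr.2 t := (List.cons_prefix_cons.mp hpre).2
    have htake : (pvRepl pr.1 pr.2 t).take qt.length = qt :=
      (List.prefix_iff_eq_take.mp hqt_pre).symm
    have hpull := pvRepl_take_pullback pr.1 pr.2 p0 pt hp r0 rt hrr hr0 t qt.length
      (by rw [htake]; exact hqt)
    rw [htake] at hpull
    have : qt <+: t := List.prefix_iff_eq_take.mpr hpull
    exact hm pr' (by simp [hpr']) (by rw [hq, hq0]; exact List.cons_prefix_cons.mpr ⟨rfl, this⟩)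

-- applying the chain to a string starting with one of the table's patterns
theorem pvChain_at_match :
    ∀ (U : List (List Char × List Char)),
      (∀ pr ∈ U, pvOkTok pr.1 ∧ pvOkTok pr.2) →
      (∀ pr ∈ U, ∀ pr' ∈ U, pr.1 ≠ pr'.1 → ¬ pr.1 <+: pr'.1) →
      (∀ pr ∈ U, ∀ pr' ∈ U, ¬ pr.1 <+: pr'.2 ∧ ¬ pr'.2 <+: pr.1) →
      (U.map Prod.fst).Nodup →
      ∀ p r, (p, r) ∈ U → ∀ y, pvChain U (p ++ y) = r ++ pvChain U y := by
  intro U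
  induction U with
  | nil => intro _ _ _ _ p r hmem; cases hmem
  | cons pr0 U' ih =>
    intro h1 h2 h3 h4 p r hmem y
    by_cases heq : pr0.1 = p
    · have hpr : pr0 = (p, r) := by
        rcases List.mem_cons.mp hmem with h | h
        · exact h.symm
        · exfalso
          have hin : p ∈ U'.map Prod.fst := List.mem_map.mpr ⟨(p, r), h, rfl⟩
          rw [List.map_cons] at h4
          exact (List.nodup_cons.mp h4).1 (heq ▸ hin)
      show pvChain U' (pvRepl pr0.1 pr0.2 (p ++ y)) = r ++ pvChain U' (pvRepl pr0.1 pr0.2 y)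
      rw [hpr]
      have hpne : p ≠ [] := by
        apply pvTok_ne_nil
        have := (h1 pr0 (by simp)).1
        rwa [hpr] at this
      rw [pvRepl_self p r hpne y]
      apply pvChain_pass_tok U' (fun pr' h => (h1 pr' (by simp [h])).1)
      · have := (h1 pr0 (by simp)).2; rw [hpr] at this; exact this
      · intro pr' hpr' x
        have h3' := h3 pr' (by simp [hpr']) pr0 (by simp)
        rw [hpr] at h3'
        exact pvNoPrefixAppend h3'.1 h3'.2 x
    · have hmem' : (p, r) ∈ U' := by
        rcases List.mem_cons.mp hmem with h | h
        · exact absurd (h ▸ rfl) heq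
        · exact h
      show pvChain U' (pvRepl pr0.1 pr0.2 (p ++ y)) = r ++ pvChain U' (pvRepl pr0.1 pr0.2 y)
      obtain ⟨p0, pt, hp0, hc0, -⟩ := pvTok_head pr0.1 (h1 pr0 (by simp)).1
      have hptok : pvOkTok p := by
        have := (h1 (p, r) hmem).1; exact this
      have hnp : ∀ x, ¬ pr0.1 <+: p ++ x := by
        apply pvNoPrefixAppend
        · exact h2 pr0 (by simp) (p, r) hmem heq
        · exact h2 (p, r) hmem pr0 (by simp) (fun h => heq h.symm)
      rw [pvRepl_pass_tok pr0.1 pr0.2 p p0 pt hp0 hc0 hptok hnp]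
      exact ih (fun pr h => h1 pr (by simp [h]))
        (fun pr h pr' h' => h2 pr (by simp [h]) pr' (by simp [h']))
        (fun pr h pr' h' => h3 pr (by simp [h]) pr' (by simp [h']))
        (by rw [List.map_cons] at h4; exact (List.nodup_cons.mp h4).2)
        p r hmem' _

-- chain = scan, the main structural theorem
theorem pvChain_eq_scan (T : List (List Char × List Char)) (hT : pvGood T) :
    ∀ s, pvChain T s = pvScan T s := by
  obtain ⟨h1, h2, h3, h4⟩ := hT
  have main : ∀ (n : Nat) (s : List Char), s.length ≤ n → pvChain T s = pvScan T s := by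
    intro n
    induction n with
    | zero =>
      intro s hs
      have : s = [] := List.eq_nil_of_length_eq_zero (Nat.le_zero.mp hs)
      subst this
      rw [pvChain_nil]
      rfl
    | succ n ih =>
      intro s hs
      cases s with
      | nil => rw [pvChain_nil]; rfl
      | cons c t =>
        cases hf : T.find? (fun pr => pr.1.isPrefixOf (c :: t)) with
        | none =>
          rw [pvScan_nomatch T c t hf]
          have hnm : ∀ pr ∈ T, ¬ pr.1 <+: c :: t := by
            intro pr hpr hp
            exact (List.find?_eq_none.mp hf pr hpr) (List.isPrefixOf_iff_prefix.mpr hp)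
          rw [pvChain_cons_char T h1 c t hnm]
          rw [ih t (by simp only [List.length_cons] at hs; omega)]
        | some pr =>
          have hmem := List.mem_of_find?_eq_some hf
          have hppre : pr.1 <+: c :: t := by
            have := List.find?_some (p := fun (pr : List Char × List Char) => pr.1.isPrefixOf (c :: t)) hf
            exact List.isPrefixOf_iff_prefix.mp this
          obtain ⟨t', ht'⟩ := hppre
          have hplen : pr.1.length ≥ 1 := by
            obtain ⟨p0, pt, hp0, -, -⟩ := pvTok_head pr.1 (h1 pr hmem).1
            rw [hp0]; simp
          have hdrop : t.drop (pr.1.length - 1) = t' := by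
            have hd : (c :: t).drop pr.1.length = t' := by
              rw [← ht']; exact List.drop_left
            obtain ⟨m, hm⟩ : ∃ m, pr.1.length = m + 1 := ⟨pr.1.length - 1, by omega⟩
            rw [hm] at hd
            simp only [List.drop_succ_cons] at hd
            rw [hm]; simpa using hd
          rw [pvScan_match T c t pr hf, hdrop]
          have hchain : pvChain T (c :: t) = pr.2 ++ pvChain T t' := by
            rw [← ht']
            exact pvChain_at_match T h1 h2 h3 h4 pr.1 pr.2 hmem t'
          rw [hchain]
          congr 1
          apply ih
          have : (c :: t).length = pr.1.length + t'.length := by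
            rw [← ht', List.length_append]
          simp only [List.length_cons] at this hs
          omega
  intro s; exact main s.length s (le_refl _)

-- A's String-level fold equals the char-level chain
theorem pvFold_eq_chain :
    ∀ (ks : List String) (g : String → String) (s : String),
      (∀ k ∈ ks, k.toList ≠ []) →
      ks.foldl (fun acc k => if PySem.Str.isIn k acc then PySem.Str.replace acc k (g k) else acc) s
        = String.ofList (pvChain (ks.map fun k => (k.toList, (g k).toList)) s.toList) := by
  intro ks
  induction ks with
  | nil =>
    intro g s _
    show s = String.ofList s.toList
    exact (String.ofList_toList).symm
  | cons k ks' ih =>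
    intro g s hk
    simp only [List.foldl_cons, List.map_cons]
    have hkne : k.toList ≠ [] := hk k (by simp)
    have hstep : (if PySem.Str.isIn k s then PySem.Str.replace s k (g k) else s)
        = String.ofList (pvRepl k.toList (g k).toList s.toList) := by
      by_cases hin : PySem.Str.isIn k s
      · rw [if_pos hin]
        show String.ofList (PySem.Chars.replace s.toList k.toList (g k).toList) = _
        rw [PySem.Chars.replace]
        rw [if_neg (by simp [List.isEmpty_iff, hkne])]
        rw [pvGo_spec k.toList (g k).toList hkne s.toList.length s.toList [] (le_refl _)]
        simp
      · rw [if_neg hin]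
        have hni : ¬ (k.toList <:+: s.toList) := by
          intro hifx
          exact hin ((PySem.Str.isIn_iff_infix k s).mpr hifx)
        rw [pvRepl_no_occ _ _ _ hni]
        exact (String.ofList_toList).symm
    rw [hstep, ih g _ (fun k' h => hk k' (by simp [h]))]
    have : (String.ofList (pvRepl k.toList (g k).toList s.toList)).toList
        = pvRepl k.toList (g k).toList s.toList := String.toList_ofList
    rw [this]
    rfl

theorem pvA_eq_chain (s : String) :
    convert_to_calculate_functions s = String.ofList (pvChain pvTableA s.toList) := by
  exact pvFold_eq_chain pvTrigFns.keys (fun k => pvTrigFns.getD k "") s (by decide)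

-- concrete table facts
theorem pvGoodA1 : ∀ pr ∈ pvTableA, pvOkTok pr.1 ∧ pvOkTok pr.2 := by decide
theorem pvGoodA2 : ∀ pr ∈ pvTableA, ∀ pr' ∈ pvTableA, pr.1 ≠ pr'.1 → ¬ pr.1 <+: pr'.1 := by decide
theorem pvGoodA3 : ∀ pr ∈ pvTableA, ∀ pr' ∈ pvTableA, ¬ pr.1 <+: pr'.2 ∧ ¬ pr'.2 <+: pr.1 := by decide
theorem pvGoodA4 : (pvTableA.map Prod.fst).Nodup := by decide
theorem pvGoodA : pvGood pvTableA := ⟨pvGoodA1, pvGoodA2, pvGoodA3, pvGoodA4⟩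

theorem pvMapFstAB : pvTableA.map Prod.fst = pvTableB.map Prod.fst := by decide

-- find? over tables with equal pattern columns returns entries with the same pattern
theorem pvFindRel :
    ∀ (T U : List (List Char × List Char)) (s : List Char),
      T.map Prod.fst = U.map Prod.fst →
      (T.find? (fun pr => pr.1.isPrefixOf s) = none ∧ U.find? (fun pr => pr.1.isPrefixOf s) = none) ∨
      (∃ p a b, T.find? (fun pr => pr.1.isPrefixOf s) = some (p, a) ∧
        U.find? (fun pr => pr.1.isPrefixOf s) = some (p, b) ∧ (p, a) ∈ T ∧ (p, b) ∈ U) := by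
  intro T
  induction T with
  | nil =>
    intro U s h
    have : U = [] := by
      cases U with
      | nil => rfl
      | cons u us => simp at h
    subst this
    left; exact ⟨rfl, rfl⟩
  | cons pr T' ih =>
    intro U s h
    cases U with
    | nil => simp at h
    | cons u us =>
      obtain ⟨p1, a1⟩ := pr
      obtain ⟨u1, b1⟩ := u
      simp only [List.map_cons, List.cons.injEq] at h
      obtain ⟨hfst, hrest⟩ := h
      subst hfst
      by_cases hp : p1.isPrefixOf s
      · right
        refine ⟨p1, a1, b1, ?_, ?_, by simp, by simp⟩
        · exact List.find?_cons_of_pos hp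
        · exact List.find?_cons_of_pos hp
      · rcases ih us s hrest with ⟨hn1, hn2⟩ | ⟨p, a, b, hs1, hs2, hm1, hm2⟩
        · left
          constructor
          · exact (List.find?_cons_of_neg (p := fun (pr : List Char × List Char) => pr.1.isPrefixOf s) hp).trans hn1
          · exact (List.find?_cons_of_neg (p := fun (pr : List Char × List Char) => pr.1.isPrefixOf s) hp).trans hn2
        · right
          refine ⟨p, a, b, ?_, ?_, by simp [hm1], by simp [hm2]⟩
          · exact (List.find?_cons_of_neg (p := fun (pr : List Char × List Char) => pr.1.isPrefixOf s) hp).trans hs1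
          · exact (List.find?_cons_of_neg (p := fun (pr : List Char × List Char) => pr.1.isPrefixOf s) hp).trans hs2

-- infix ↔ some drop has it as a prefix
theorem pvInfix_iff_drop (sub s : List Char) :
    sub <:+: s ↔ ∃ j, sub <+: s.drop j := by
  constructor
  · intro h
    exact (PySem.Chars.exists_prefix_drop_iff_isIn sub s).mpr
      ((PySem.Chars.isIn_iff_infix sub s).mpr h)
  · intro hj
    exact (PySem.Chars.isIn_iff_infix sub s).mp
      ((PySem.Chars.exists_prefix_drop_iff_isIn sub s).mp hj)

-- an occurrence of a pattern in (p ++ t') with p a different table pattern starts in t'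
theorem pvOcc_shift (p t' : List Char) (hocc : pvTanP <:+: p ++ t')
    (hd1 : ¬ pvTanP <+: p) (hd2 : ¬ p <+: pvTanP)
    (htail : ∀ x ∈ p.tail, pvMark x = false) :
    pvTanP <:+: t' := by
  rw [pvInfix_iff_drop] at hocc
  obtain ⟨j, hj⟩ := hocc
  rcases Nat.lt_or_ge j p.length with hlt | hge
  · exfalso
    rcases Nat.eq_zero_or_pos j with hj0 | hjpos
    · subst hj0
      simp only [List.drop_zero] at hj
      rcases List.prefix_or_prefix_of_prefix hj (List.prefix_append p t') with h | h
      · exact hd1 h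
      · exact hd2 h
    · -- 1 ≤ j < p.length : the head of (p ++ t').drop j is a marker-free char of p.tail
      have hdropj : (p ++ t').drop j = p.drop j ++ t' :=
        List.drop_append_of_le_length (by omega)
      rw [hdropj] at hj
      have hpj : p.drop j ≠ [] := by
        intro h
        have := List.length_drop (i := j) (l := p)
        rw [h] at this
        simp at this
        omega
      obtain ⟨a, rest, ha⟩ := List.exists_cons_of_ne_nil hpj
      rw [ha, List.cons_append] at hj
      have hhd : '\\' = a := by
        have : pvTanP = '\\' :: "operatorname { tan }".toList := by decide
        rw [this] at hj
        exact (List.cons_prefix_cons.mp hj).1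
      have hmem : a ∈ p.tail := by
        have h1 : p.drop j = p.tail.drop (j - 1) := by
          have : p.tail = p.drop 1 := (List.drop_one).symm
          rw [this, List.drop_drop]
          congr 1
          omega
        have : a ∈ p.drop j := by rw [ha]; simp
        rw [h1] at this
        exact List.mem_of_mem_drop this
      have := htail a hmem
      rw [← hhd] at this
      simp [pvMark] at this
  · apply (pvInfix_iff_drop pvTanP t').mpr
    refine ⟨j - p.length, ?_⟩
    have hdd : (p ++ t').drop j = t'.drop (j - p.length) := by
      rw [show j = p.length + (j - p.length) by omega, ← List.drop_drop, List.drop_left]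
      congr 1
      omega
    rwa [hdd] at hj

-- concrete decide facts about the two tables
theorem pvTanP_in_A : pvTanP ∈ pvTableA.map Prod.fst := by decide
theorem pvA_fst_ne_nil : ∀ pr ∈ pvTableA, pr.1 ≠ [] := by decide
theorem pvAB_same_rep : ∀ pr ∈ pvTableA, ∀ pr' ∈ pvTableB,
    pr.1 = pr'.1 → pr.1 ≠ pvTanP → pr.2 = pr'.2 := by decide
theorem pvA_tan_len : ∀ pr ∈ pvTableA, pr.1 = pvTanP → pr.2.length = 3 := by decide
theorem pvB_tan_len : ∀ pr ∈ pvTableB, pr.1 = pvTanP → pr.2.length = 4 := by decide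
theorem pvA_tan_sep : ∀ pr ∈ pvTableA, pr.1 ≠ pvTanP →
    ¬ pvTanP <+: pr.1 ∧ ¬ pr.1 <+: pvTanP := by decide
theorem pvA_tail_free : ∀ pr ∈ pvTableA, ∀ x ∈ pr.1.tail, pvMark x = false := by
  intro pr hpr x hx
  obtain ⟨p0, pt, hp, -, hfree⟩ := pvTok_head pr.1 (pvGoodA1 pr hpr).1
  rw [hp] at hx
  exact hfree x (by simpa using hx)

-- the two scans agree off the tan pattern, and B's result is strictly longer on it
theorem pvCmp : ∀ (n : Nat) (s : List Char), s.length ≤ n →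
    (¬ pvTanP <:+: s → pvScan pvTableA s = pvScan pvTableB s) ∧
    (pvScan pvTableA s).length ≤ (pvScan pvTableB s).length ∧
    (pvTanP <:+: s → (pvScan pvTableA s).length < (pvScan pvTableB s).length) := by
  intro n
  induction n with
  | zero =>
    intro s hs
    have : s = [] := List.eq_nil_of_length_eq_zero (Nat.le_zero.mp hs)
    subst this
    refine ⟨fun _ => rfl, le_refl _, fun h => ?_⟩
    exact absurd (List.eq_nil_of_infix_nil h) (by decide)
  | succ n ih =>
    intro s hs
    cases s with
    | nil =>
      refine ⟨fun _ => rfl, le_refl _, fun h => ?_⟩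
      exact absurd (List.eq_nil_of_infix_nil h) (by decide)
    | cons c t =>
      simp only [List.length_cons] at hs
      rcases pvFindRel pvTableA pvTableB (c :: t) pvMapFstAB with ⟨hn1, hn2⟩ | ⟨p, a, b, hs1, hs2, hm1, hm2⟩
      · -- no pattern matches at this position
        rw [pvScan_nomatch _ c t hn1, pvScan_nomatch _ c t hn2]
        obtain ⟨hEq, hLe, hLt⟩ := ih t (by omega)
        refine ⟨?_, by simpa using hLe, ?_⟩
        · intro hni
          rw [hEq (fun h => hni (List.infix_cons h))]
        · intro hocc
          rcases List.infix_cons_iff.mp hocc with hpre | hifx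
          · exfalso
            obtain ⟨pr, hprmem, hprfst⟩ := List.mem_map.mp pvTanP_in_A
            have := List.find?_eq_none.mp hn1 pr hprmem
            rw [List.isPrefixOf_iff_prefix] at this
            rw [hprfst] at this
            exact this hpre
          · have := hLt hifx
            simp only [List.length_cons]
            omega
      · -- pattern p matches at this position in both tables
        rw [pvScan_match _ c t (p, a) hs1, pvScan_match _ c t (p, b) hs2]
        simp only
        have hppre : p <+: c :: t := by
          have := List.find?_some (p := fun (pr : List Char × List Char) => pr.1.isPrefixOf (c :: t)) hs1
          exact List.isPrefixOf_iff_prefix.mp this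
        obtain ⟨t', ht'⟩ := hppre
        have hpne : p ≠ [] := pvA_fst_ne_nil (p, a) hm1
        have hplen : p.length ≥ 1 := by
          cases p with
          | nil => exact absurd rfl hpne
          | cons _ _ => simp
        have hdrop : t.drop (p.length - 1) = t' := by
          have hd : (c :: t).drop p.length = t' := by
            rw [← ht']; exact List.drop_left
          obtain ⟨m, hm⟩ : ∃ m, p.length = m + 1 := ⟨p.length - 1, by omega⟩
          rw [hm] at hd
          simp only [List.drop_succ_cons] at hd
          rw [hm]; simpa using hd
        rw [hdrop]
        have ht'len : t'.length ≤ n := by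
          have : (c :: t).length = p.length + t'.length := by
            rw [← ht', List.length_append]
          simp only [List.length_cons] at this
          omega
        obtain ⟨hEq, hLe, hLt⟩ := ih t' ht'len
        by_cases htan : p = pvTanP
        · -- the tan entry fired: A appends 3 chars, B appends 4
          have hal : a.length = 3 := pvA_tan_len (p, a) hm1 htan
          have hbl : b.length = 4 := pvB_tan_len (p, b) hm2 htan
          refine ⟨?_, ?_, ?_⟩
          · intro hni
            exfalso
            apply hni
            rw [← ht', htan] at *
            exact (List.prefix_append pvTanP t').isInfix
          · simp only [List.length_append]; omega
          · intro _
            simp only [List.length_append]; omega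
        · -- another entry fired: the replacements agree
          have hab : a = b := pvAB_same_rep (p, a) hm1 (p, b) hm2 rfl htan
          subst hab
          refine ⟨?_, ?_, ?_⟩
          · intro hni
            rw [hEq (fun h => hni (by
              rw [← ht']
              exact h.trans (List.suffix_append p t').isInfix))]
          · simp only [List.length_append]; omega
          · intro hocc
            have hsep := pvA_tan_sep (p, a) hm1 htan
            have hocc' : pvTanP <:+: t' := by
              apply pvOcc_shift p t' (by rw [ht']; exact hocc) hsep.1 hsep.2
              exact pvA_tail_free (p, a) hm1
            have := hLt hocc'
            simp only [List.length_append]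
            omega

-- good shape of the full statement pieces
theorem pvAlt_toList (s : String) :
    (convert_to_calculate_functions_alt s).toList = pvScan pvTableB s.toList := by
  show (String.ofList (pvScan pvTableB s.toList)).toList = _
  exact String.toList_ofList

theorem pvA_toList (s : String) :
    (convert_to_calculate_functions s).toList = pvScan pvTableA s.toList := by
  rw [pvA_eq_chain]
  rw [String.toList_ofList]
  exact pvChain_eq_scan pvTableA pvGoodA s.toList

theorem pvD_iff (s : String) :
    D_convert_to_calculate_functions s ↔ pvTanP <:+: s.toList := by
  unfold D_convert_to_calculate_functions
  rw [PySem.Str.isIn_iff_infix]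
  exact Iff.rfl

-- ===== VERDICT (by name: the statement is the Claim_ definition above) =====
theorem convert_to_calculate_functions_spec : Claim_unchanged_convert_to_calculate_functions := by
  intro s _ hnD
  have hni : ¬ pvTanP <:+: s.toList := fun h => hnD ((pvD_iff s).mpr h)
  have hEq := (pvCmp s.toList.length s.toList (le_refl _)).1 hni
  have h1 := pvA_toList s
  have h2 := pvAlt_toList s
  calc convert_to_calculate_functions s
      = String.ofList (convert_to_calculate_functions s).toList := String.ofList_toList.symm
    _ = String.ofList (convert_to_calculate_functions_alt s).toList := by rw [h1, h2, hEq]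
    _ = convert_to_calculate_functions_alt s := String.ofList_toList

theorem convert_to_calculate_functions_changed : Claim_changed_convert_to_calculate_functions := by
  unfold Claim_changed_convert_to_calculate_functions
  refine ⟨by decide, by decide, by rfl, ?_, by decide⟩
  show String.ofList (pvScan pvTableB _) = _
  decide

theorem convert_to_calculate_functions_tight : Claim_exact_convert_to_calculate_functions := by
  intro s _ hD hcontra
  have hocc : pvTanP <:+: s.toList := (pvD_iff s).mp hD
  have hLt := (pvCmp s.toList.length s.toList (le_refl _)).2.2 hocc
  have h1 := pvA_toList s
  have h2 := pvAlt_toList s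
  rw [hcontra] at h1
  rw [h2] at h1
  rw [h1] at hLt
  exact lt_irrefl _ hLt
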